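-- pv_equiv track=rewrite | github.com/ZScurlock/PymiRa | src/PymiRa/functions.py | lf_mapping
-- ===== SOURCE A (Python) =====
-- def lf_mapping(bwt, letters=None):
--     if letters is None:
--         letters = set(bwt)
--
--     result = {letter:[0] for letter in letters}
--     result[bwt[0]] = [1]
--     for letter in bwt[1:]:
--         for i, j in result.items():
--             j.append(j[-1] + (i == letter))
--     return(result)
-- ===== SOURCE B (Python) =====
-- def lf_mapping(bwt, letters=None):
--     """Rank table of bwt: one row per letter, each a cumulative occurrence count.
--
--     Rows cover the given letters (default: bwt's alphabet); bwt's first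
--     character always gets a row, since its count opens the table at 1.
--     """
--     keys = dict.fromkeys(bwt if letters is None else [*letters, bwt[0]])
--     result = {}
--     for L in keys:
--         count = 0
--         ranks = []
--         for ch in bwt:
--             count += (ch == L)
--             ranks.append(count)
--         result[L] = ranks
--     return result
-- ===== Notes on version B (the rewrite author's own statement) =====
-- stated objective: idiomatic
-- what changed: Transposed the computation from position-major (one pass over bwt growing every letter's list in lockstep inside a dict) to letter-major (the row set -- the given letters plus bwt's first character -- is fixed up front, then each letter gets its own independent running-counter scan of bwt).
import Mathlib
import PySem

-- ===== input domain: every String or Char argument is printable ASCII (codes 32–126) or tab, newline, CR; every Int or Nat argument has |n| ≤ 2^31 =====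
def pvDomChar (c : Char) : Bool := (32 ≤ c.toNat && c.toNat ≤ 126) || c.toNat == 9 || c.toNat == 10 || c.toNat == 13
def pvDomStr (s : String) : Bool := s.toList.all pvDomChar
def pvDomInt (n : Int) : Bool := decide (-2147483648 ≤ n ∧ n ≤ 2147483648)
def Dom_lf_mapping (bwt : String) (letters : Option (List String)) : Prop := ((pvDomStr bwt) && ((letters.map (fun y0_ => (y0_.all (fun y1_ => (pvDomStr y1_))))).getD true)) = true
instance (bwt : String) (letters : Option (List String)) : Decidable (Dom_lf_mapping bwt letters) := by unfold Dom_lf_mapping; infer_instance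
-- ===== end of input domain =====

-- B computes the table letter-major (row set fixed up front, one independent running-counter
-- scan of bwt per row) instead of A's position-major pass; return values agree.

-- ===== PORT A =====
-- position-major: dict of lists, one pass over bwt[1:] appending to every value
def lf_mapping (bwt : String) (letters : Option (List String)) : List (String × List Int) :=
  match bwt.toList with
  | [] => []   -- bwt[0] raises IndexError in Python; excluded by Pre_
  | c0 :: rest =>
    let ls : List String :=
      match letters with
      | none => PySem.Set.ofList (bwt.toList.map (fun c => String.mk [c]))   -- set(bwt)
      | some l => l
    -- result = {letter:[0] for letter in letters}
    let d0 : PySem.Dict String (List Int) :=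
      ls.foldl (fun d letter => d.insert letter ([0] : List Int)) PySem.Dict.empty
    -- result[bwt[0]] = [1]
    let d1 := d0.insert (String.mk [c0]) ([1] : List Int)
    -- for letter in bwt[1:]: for i, j in result.items(): j.append(j[-1] + (i == letter))
    let d2 := rest.foldl
      (fun d letter =>
        PySem.Dict.mk (d.items.map (fun ij =>
          (ij.1, ij.2 ++ [ij.2.getLastD 0 + (if ij.1 = String.mk [letter] then (1 : Int) else 0)]))))
      d1
    d2.items

-- ===== PORT B =====
-- letter-major: the row set fixed up front, then one cumulative occurrence count of bwt per row
def lf_mapping_alt (bwt : String) (letters : Option (List String)) : List (String × List Int) :=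
  match bwt.toList with
  | [] => []   -- bwt[0] raises IndexError in Python; excluded by Pre_
  | c0 :: _ =>
    -- keys = dict.fromkeys(bwt if letters is None else [*letters, bwt[0]])
    let keys : List String :=
      match letters with
      | none => PySem.Set.ofList (bwt.toList.map (fun c => String.mk [c]))
      | some l => PySem.Set.ofList (l ++ [String.mk [c0]])
    keys.map (fun L =>
      (L, (bwt.toList.foldl
            (fun (acc : Int × List Int) ch =>
              let count := acc.1 + (if String.mk [ch] = L then (1 : Int) else 0)
              (count, acc.2 ++ [count]))
            (0, [])).2))

-- ===== PRECONDITION & SPEC =====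
-- Pre_ excludes only the empty string, on which A raises IndexError at bwt[0].
def Pre_lf_mapping (bwt : String) (letters : Option (List String)) : Prop := bwt ≠ ""
instance (bwt : String) (letters : Option (List String)) : Decidable (Pre_lf_mapping bwt letters) := by unfold Pre_lf_mapping; infer_instance
def pvWitness_lf_mapping : String × Option (List String) := ("abcab", some ["a", "b", "z"])
def Spec_lf_mapping (bwt : String) (letters : Option (List String)) (out : List (String × List Int)) : Prop := out = lf_mapping_alt bwt letters
instance (bwt : String) (letters : Option (List String)) (out : List (String × List Int)) : Decidable (Spec_lf_mapping bwt letters out) := by unfold Spec_lf_mapping; infer_instance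

-- ===== CLAIM (what is proved, stated in full; the proofs are below) =====
def Claim_equal_lf_mapping : Prop := ∀ (bwt : String) (letters : Option (List String)), Dom_lf_mapping bwt letters → Pre_lf_mapping bwt letters → Spec_lf_mapping bwt letters (lf_mapping bwt letters)

-- ===== LEMMAS AND PROOFS =====

-- cumulative indicator counts of L over cs, starting from running count n
def rankAux (L : String) (n : Int) : List Char → List Int
  | [] => []
  | c :: cs =>
    let n' := n + (if String.mk [c] = L then (1 : Int) else 0)
    n' :: rankAux L n' cs

theorem getLastD_append_singleton (js : List Int) (x : Int) :
    ∀ d, (js ++ [x]).getLastD d = x := by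
  induction js with
  | nil => intro d; rfl
  | cons a as ih =>
    intro d
    rw [List.cons_append, List.getLastD_cons]
    exact ih a

theorem ite_eq_comm (a b : Int) (x y : String) :
    (if x = y then a else b) = (if y = x then a else b) := by
  simp [eq_comm]

-- A's per-key loop value
theorem foldl_append_getLastD (L : String) (cs : List Char) :
    ∀ (js : List Int), js ≠ [] →
      cs.foldl (fun j ch => j ++ [j.getLastD 0 + (if L = String.mk [ch] then (1 : Int) else 0)]) js
        = js ++ rankAux L (js.getLastD 0) cs := by
  induction cs with
  | nil => intro js _; simp [rankAux]
  | cons c cs ih =>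
    intro js hjs
    have h := ih (js ++ [js.getLastD 0 + (if L = String.mk [c] then (1 : Int) else 0)]) (by simp)
    simp only [List.foldl_cons]
    rw [h, getLastD_append_singleton]
    simp [rankAux, ite_eq_comm]

-- B's per-key loop value
theorem foldl_count_pair (L : String) (cs : List Char) :
    ∀ (n : Int) (js : List Int),
      (cs.foldl (fun (acc : Int × List Int) ch =>
          let count := acc.1 + (if String.mk [ch] = L then (1 : Int) else 0)
          (count, acc.2 ++ [count])) (n, js)).2
        = js ++ rankAux L n cs := by
  induction cs with
  | nil => intro n js; simp [rankAux]
  | cons c cs ih =>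
    intro n js
    simp only [List.foldl_cons]
    rw [ih]
    simp [rankAux]

-- pointwise fold over an assoc list that is an image of a key list
theorem foldl_map_pointwise (h : String → List Int → Char → List Int) (cs : List Char) :
    ∀ (K : List String) (v : String → List Int),
      cs.foldl (fun its ch => its.map (fun ij => (ij.1, h ij.1 ij.2 ch)))
        (K.map (fun L => (L, v L)))
      = K.map (fun L => (L, cs.foldl (fun j ch => h L j ch) (v L))) := by
  induction cs with
  | nil => intro K v; rfl
  | cons c cs ih =>
    intro K v
    simp only [List.foldl_cons, List.map_map]
    have he : ((fun ij : String × List Int => (ij.1, h ij.1 ij.2 c)) ∘ fun L => (L, v L))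
        = fun L => (L, h L (v L) c) := rfl
    rw [he, ih]

-- all values of the initial dict built by the comprehension are [0]
theorem values_foldl_insert_const (ls : List String) :
    ∀ (d : PySem.Dict String (List Int)),
      (∀ p ∈ d.items, p.2 = ([0] : List Int)) →
      ∀ p ∈ (ls.foldl (fun d letter => d.insert letter ([0] : List Int)) d).items, p.2 = ([0] : List Int) := by
  induction ls with
  | nil => intro d hd; exact hd
  | cons l ls ih =>
    intro d hd
    refine ih (d.insert l [0]) ?_
    intro p hp
    rcases (PySem.Dict.mem_items_insert d l [0] p).1 hp with h | h
    · rw [h]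
    · exact hd p h.1

theorem items_eq_map_keys_of_const {v : List Int} (its : List (String × List Int))
    (h : ∀ p ∈ its, p.2 = v) : its = (its.map Prod.fst).map (fun L => (L, v)) := by
  induction its with
  | nil => rfl
  | cons p ps ih =>
    cases p with
    | mk a b =>
      have hb : b = v := h (a, b) (List.mem_cons_self ..)
      simp only [List.map_cons]
      rw [← ih (fun q hq => h q (List.mem_cons_of_mem _ hq)), hb]

-- the whole computation of A, reduced to B's letter-major shape, over plain lists
theorem lf_core (c0 : Char) (rest : List Char) (ls : List String) :
    rest.foldl
      (fun its letter => its.map (fun ij =>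
        (ij.1, ij.2 ++ [ij.2.getLastD 0 + (if ij.1 = String.mk [letter] then (1 : Int) else 0)])))
      ((ls.foldl (fun d letter => d.insert letter ([0] : List Int)) PySem.Dict.empty).insert
        (String.mk [c0]) ([1] : List Int)).items
    = (PySem.Set.add (PySem.Set.ofList ls) (String.mk [c0])).map
        (fun L => (L, ((c0 :: rest).foldl
            (fun (acc : Int × List Int) ch =>
              let count := acc.1 + (if String.mk [ch] = L then (1 : Int) else 0)
              (count, acc.2 ++ [count]))
            (0, [])).2)) := by
  set c0s := String.mk [c0] with hc0s
  set base := PySem.Set.ofList ls with hbase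
  set d0 : PySem.Dict String (List Int) :=
    ls.foldl (fun d letter => d.insert letter ([0] : List Int)) PySem.Dict.empty with hd0
  have hkeys0 : d0.keys = base := by
    have h1 := PySem.Dict.keys_foldl_insert (ν := List Int) ls (fun _ _ => ([0] : List Int)) PySem.Dict.empty
    rw [show (PySem.Dict.empty : PySem.Dict String (List Int)).keys = [] from rfl,
      PySem.Set.update_nil_left] at h1
    exact h1
  have hvals0 : ∀ p ∈ d0.items, p.2 = ([0] : List Int) := by
    refine values_foldl_insert_const ls PySem.Dict.empty ?_
    intro p hp; simp [PySem.Dict.empty] at hp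
  have hitems0 : d0.items = base.map (fun L => (L, ([0] : List Int))) := by
    have h2 := items_eq_map_keys_of_const d0.items hvals0
    rwa [show d0.items.map Prod.fst = d0.keys from rfl, hkeys0] at h2
  have hnodup : base.Nodup := PySem.Set.nodup_ofList ls
  -- items after result[bwt[0]] = [1]
  have hitems1 : (d0.insert c0s ([1] : List Int)).items
      = (PySem.Set.add base c0s).map (fun L => (L, if L = c0s then ([1] : List Int) else [0])) := by
    by_cases hmem : c0s ∈ base
    · have hcont : d0.contains c0s = true := by
        rw [PySem.Dict.contains_iff_mem_keys, hkeys0]; exact hmem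
      rw [PySem.Dict.items_insert_of_contains d0 _ hcont, hitems0, List.map_map]
      have hKeq : PySem.Set.add base c0s = base := by
        simp [PySem.Set.add, PySem.Set.contains, hmem]
      rw [hKeq]
      apply List.map_congr_left
      intro L _
      by_cases hL : L = c0s <;> simp [hL]
    · have hcont : d0.contains c0s = false := by
        rw [Bool.eq_false_iff]
        intro hc
        exact hmem (by rw [← hkeys0]; exact (PySem.Dict.contains_iff_mem_keys d0 c0s).1 hc)
      rw [PySem.Dict.items_insert_of_not_contains d0 _ hcont, hitems0]
      have hKeq : PySem.Set.add base c0s = base ++ [c0s] := by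
        simp [PySem.Set.add, PySem.Set.contains, hmem]
      rw [hKeq, List.map_append]
      congr 1
      · apply List.map_congr_left
        intro L hL
        have hne : L ≠ c0s := fun h => hmem (h ▸ hL)
        simp [hne]
      · simp
  rw [hitems1,
    foldl_map_pointwise
      (fun L j ch => j ++ [j.getLastD 0 + (if L = String.mk [ch] then (1 : Int) else 0)]) rest]
  apply List.map_congr_left
  intro L _
  congr 1
  rw [foldl_append_getLastD L rest _ (by split <;> simp),
    foldl_count_pair L (c0 :: rest) 0 []]
  by_cases hL : L = c0s
  · simp [hL, rankAux, hc0s]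
  · have hne : String.mk [c0] ≠ L := fun h => hL (h.symm ▸ hc0s)
    simp [hL, rankAux, hne]

theorem items_foldl_mk (cs : List Char) :
    ∀ (d : PySem.Dict String (List Int)),
      (cs.foldl (fun d letter => PySem.Dict.mk (d.items.map (fun ij =>
          (ij.1, ij.2 ++ [ij.2.getLastD 0 + (if ij.1 = String.mk [letter] then (1 : Int) else 0)])))) d).items
      = cs.foldl (fun its letter => its.map (fun ij =>
          (ij.1, ij.2 ++ [ij.2.getLastD 0 + (if ij.1 = String.mk [letter] then (1 : Int) else 0)]))) d.items := by
  induction cs with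
  | nil => intro d; rfl
  | cons c cs ih => intro d; simp only [List.foldl_cons]; rw [ih]

-- B's key list for an explicit letters list is exactly the Set.add A's assignment produces
theorem ofList_append_singleton (l : List String) (x : String) :
    PySem.Set.ofList (l ++ [x]) = PySem.Set.add (PySem.Set.ofList l) x := by
  rw [PySem.Set.ofList_append, PySem.Set.update_cons, PySem.Set.update_nil]

theorem lf_mapping_eq (bwt : String) (letters : Option (List String))
    (hpre : bwt ≠ "") : lf_mapping bwt letters = lf_mapping_alt bwt letters := by
  match hb : bwt.toList with
  | [] =>
    exact absurd (String.toList_eq_nil_iff.mp hb) hpre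
  | c0 :: rest =>
    cases letters with
    | none =>
      simp only [lf_mapping, lf_mapping_alt, hb]
      rw [items_foldl_mk]
      have h := lf_core c0 rest (PySem.Set.ofList ((c0 :: rest).map (fun c => String.mk [c])))
      rw [PySem.Set.ofList_ofList] at h
      rw [h]
      -- bwt[0] is already in set(bwt), so Set.add is the identity on the key list
      have hmem : String.mk [c0] ∈ PySem.Set.ofList ((c0 :: rest).map (fun c => String.mk [c])) := by
        rw [PySem.Set.mem_ofList]
        exact List.mem_map_of_mem (List.mem_cons_self ..)
      simp [PySem.Set.add, PySem.Set.contains, hmem]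
    | some l =>
      simp only [lf_mapping, lf_mapping_alt, hb]
      rw [items_foldl_mk, ofList_append_singleton]
      exact lf_core c0 rest l

-- ===== VERDICT (by name: the statement is the Claim_ definition above) =====
theorem lf_mapping_spec : Claim_equal_lf_mapping := by
  intro bwt letters _ hpre
  unfold Spec_lf_mapping
  exact lf_mapping_eq bwt letters hpre
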